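-- pv_equiv track=rewrite | github.com/ZIDOUZI/Python | 作业/9(实验)/5/5.9.py | find
-- ===== SOURCE A (Python) =====
-- def find(n):
--     t = [1] * n
--     c = 1
--     while True:
--         if n ** 3 == (c + n - 1) * n:
--             for m in range(n):
--                 t[m] = c + m * 2
--             return t
--         c += 2
-- ===== SOURCE B (Python) =====
-- def find(n):
--     c = n * n - n + 1
--     return [c + 2 * m for m in range(n)]
-- ===== Notes on version B (the rewrite author's own statement) =====
-- stated objective: faster
-- what changed: B computes the first odd term c = n^2-n+1 in closed form and builds the list in one comprehension, instead of A's linear search over odd c with a re-check of n^3 == (c+n-1)*n at each step followed by an in-place fill.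
import Mathlib
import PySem

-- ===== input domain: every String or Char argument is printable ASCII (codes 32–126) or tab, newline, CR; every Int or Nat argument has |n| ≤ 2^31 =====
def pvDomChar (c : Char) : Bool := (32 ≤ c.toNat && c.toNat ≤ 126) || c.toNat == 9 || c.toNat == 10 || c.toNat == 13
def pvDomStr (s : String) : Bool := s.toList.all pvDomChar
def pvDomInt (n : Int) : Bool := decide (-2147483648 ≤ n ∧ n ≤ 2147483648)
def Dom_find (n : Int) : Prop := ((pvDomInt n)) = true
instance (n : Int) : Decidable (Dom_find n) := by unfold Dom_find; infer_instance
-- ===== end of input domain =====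

-- B replaces A's linear search for the starting odd term by the closed form c = n^2 - n + 1.

-- ===== PORT A =====
-- the body of the successful iteration: for m in range(n): t[m] = c + m*2; return t
def findBody (n c : Int) : List Int :=
  (PySem.List.pyRange 0 n 1).foldl
    (fun t m => PySem.List.pySetD t m (c + m * 2)) (List.replicate n.toNat 1)

-- the 'while True' loop over c = 1, 3, 5, …; fuel only makes the recursion total
def findLoop (n c : Int) : Nat → List Int
  | 0 => []
  | fuel + 1 =>
    if n ^ 3 == (c + n - 1) * n then findBody n c
    else findLoop n (c + 2) fuel

def find (n : Int) : List Int := findLoop n 1 (n * n - n + 1).toNat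

-- ===== PORT B =====
def find_alt (n : Int) : List Int :=
  (PySem.List.pyRange 0 n 1).map (fun m => n * n - n + 1 + 2 * m)

-- ===== PRECONDITION & SPEC =====
def Spec_find (n : Int) (out : List Int) : Prop := out = find_alt n
instance (n : Int) (out : List Int) : Decidable (Spec_find n out) := by unfold Spec_find; infer_instance

-- ===== CLAIM (what is proved, stated in full; the proofs are below) =====
def Claim_equal_find : Prop := ∀ (n : Int), Dom_find n → Spec_find n (find n)

-- ===== LEMMAS AND PROOFS =====

-- the in-place fill of [1]*n with t[m] = c + 2m, taken up to index j, is the mapped range prefix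
lemma findBody_fill (n c : Int) (j : Nat) (hj : (j : Int) ≤ n) :
    (PySem.List.pyRange 0 j 1).foldl
        (fun t m => PySem.List.pySetD t m (c + m * 2)) (List.replicate n.toNat 1)
      = (PySem.List.pyRange 0 j 1).map (fun m => c + 2 * m)
        ++ List.replicate (n.toNat - j) 1 := by
  induction j with
  | zero => simp
  | succ j ih =>
    have hj' : (j : Int) ≤ n := by push_cast at hj ⊢; omega
    have hsplit : PySem.List.pyRange 0 ((j : Int) + 1) 1
        = PySem.List.pyRange 0 j 1 ++ [(j : Int)] :=
      PySem.List.pyRange_one_succ_right (by positivity)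
    push_cast
    rw [hsplit, List.foldl_append, List.map_append, ih hj']
    have hlen : ((PySem.List.pyRange 0 (j : Int) 1).map (fun m => c + 2 * m)).length = j := by
      simp [PySem.List.length_pyRange_one]
    have hjn : j < n.toNat := by omega
    simp only [List.foldl_cons, List.foldl_nil, List.map_cons, List.map_nil]
    rw [PySem.List.pySetD_natCast]
    rw [List.set_append_right _ _ (by omega), hlen, Nat.sub_self]
    have : n.toNat - j = (n.toNat - (j + 1)) + 1 := by omega
    rw [this, List.replicate_succ, List.set_cons_zero, List.append_assoc]
    simp [mul_comm]

lemma findBody_eq (n c : Int) (h : c = n * n - n + 1) : findBody n c = find_alt n := by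
  by_cases hn : n ≤ 0
  · have h0 : PySem.List.pyRange 0 n 1 = [] := PySem.List.pyRange_one_eq_nil hn
    simp [findBody, find_alt, h0]
    omega
  · have := findBody_fill n c n.toNat (by omega)
    rw [show ((n.toNat : Int)) = n from by omega] at this
    simpa [findBody, find_alt, h] using this

lemma findLoop_eq (n : Int) : ∀ (fuel k : Nat) (c : Int), k < fuel →
    n * n - n + 1 = c + 2 * k → findLoop n c fuel = find_alt n := by
  intro fuel
  induction fuel with
  | zero => intro k c hk; omega
  | succ fuel ih =>
    intro k c hk hc
    rw [findLoop]
    by_cases hcond : n ^ 3 = (c + n - 1) * n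
    · rw [if_pos (beq_iff_eq.mpr hcond)]
      rcases eq_or_ne n 0 with h0 | h0
      · subst h0
        simp [findBody, find_alt]
      · apply findBody_eq
        have : n * n * n = (c + n - 1) * n := by ring_nf; ring_nf at hcond; linarith
        have := mul_right_cancel₀ h0 this
        omega
    · rw [if_neg (by simpa using hcond)]
      rcases Nat.eq_zero_or_pos k with hk0 | hk0
      · exfalso
        apply hcond
        have : c = n * n - n + 1 := by omega
        subst this; ring
      · exact ih (k - 1) (c + 2) (by omega) (by omega)

-- ===== VERDICT (by name: the statement is the Claim_ definition above) =====
theorem find_spec : Claim_equal_find := by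
  intro n _
  unfold Spec_find find
  obtain ⟨m, hm⟩ := Int.even_mul_succ_self (n - 1)
  have hm' : n * n - n = 2 * m := by ring_nf at hm ⊢; linarith
  have hm0 : 0 ≤ m := by nlinarith [sq_nonneg n, sq_nonneg (n - 1)]
  apply findLoop_eq n _ m.toNat
  · omega
  · omega
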